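-- pv_equiv track=rewrite | github.com/lrslab/Hammerhead-motif | hammermotif/motif_greedy.py | consensus_from_cluster
-- ===== SOURCE A (Python) =====
-- def degenerate_code(bases):
--     """
--     Map a sorted tuple of bases to an IUPAC degenerate code.
--     For example, ('A', 'T') returns 'W'.
--     """
--     mapping = {
--         ('A',): 'A',
--         ('C',): 'C',
--         ('G',): 'G',
--         ('T',): 'T',
--         ('A', 'C'): 'M',
--         ('A', 'G'): 'R',
--         ('A', 'T'): 'W',
--         ('C', 'G'): 'S',
--         ('C', 'T'): 'Y',
--         ('G', 'T'): 'K',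
--         ('A', 'C', 'G'): 'V',
--         ('A', 'C', 'T'): 'H',
--         ('A', 'G', 'T'): 'D',
--         ('C', 'G', 'T'): 'B',
--         ('A', 'C', 'G', 'T'): 'N'
--     }
--     return mapping.get(tuple(sorted(bases)), 'N')
--
-- def consensus_from_cluster(cluster):
--     """
--     Generate a consensus motif from a list of motifs (all of the same length).
--     At each position, use the set of bases from all motifs to produce a degenerate code.
--     """
--     if not cluster:
--         return ""
--     length = len(cluster[0])
--     consensus = []
--     for i in range(length):
--         letters = {motif[i] for motif in cluster}
--         consensus.append(degenerate_code(letters))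
--     return ''.join(consensus)
-- ===== SOURCE B (Python) =====
-- def consensus_from_cluster(cluster):
--     """
--     Generate a consensus motif by folding motifs into a running per-position
--     bitmask list: start from the first motif's base bits (A=1,C=2,G=4,T=8;
--     0 marks a non-ACGT position), OR each further motif in position-wise,
--     then decode each mask through a 16-entry IUPAC table.
--     """
--     if not cluster:
--         return ""
--     B2M = {'A': 1, 'C': 2, 'G': 4, 'T': 8}
--     masks = [B2M.get(ch, 0) for ch in cluster[0]]
--     for motif in cluster[1:]:
--         masks = [m | B2M.get(ch, 0) if m and B2M.get(ch, 0) else 0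
--                  for m, ch in zip(masks, motif)]
--     M2C = '?ACMGRSVTWYHKDBN'
--     return ''.join(M2C[m] if m else 'N' for m in masks)
-- ===== Notes on version B (the rewrite author's own statement) =====
-- stated objective: alternative
-- what changed: B traverses the data row-wise: it folds each further motif into one running list of per-position base bitmasks (A=1,C=2,G=4,T=8, 0 marking a non-ACGT base) via a position-wise merge, then decodes the mask list once through a 16-entry IUPAC table, instead of A's column-wise loop that builds a set per position and looks up its sorted tuple in a dict.
import Mathlib
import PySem

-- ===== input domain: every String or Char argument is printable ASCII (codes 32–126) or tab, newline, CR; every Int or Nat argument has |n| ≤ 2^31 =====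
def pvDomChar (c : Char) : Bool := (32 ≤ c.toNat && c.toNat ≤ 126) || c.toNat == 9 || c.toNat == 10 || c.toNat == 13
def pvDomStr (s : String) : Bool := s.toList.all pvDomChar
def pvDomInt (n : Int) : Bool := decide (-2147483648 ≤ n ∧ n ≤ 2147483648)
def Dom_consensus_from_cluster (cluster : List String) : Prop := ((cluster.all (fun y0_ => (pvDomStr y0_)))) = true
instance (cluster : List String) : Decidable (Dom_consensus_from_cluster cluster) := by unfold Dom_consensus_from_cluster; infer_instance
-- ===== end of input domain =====

-- B folds the motifs ROW-WISE into one running list of per-position base bitmasks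
-- (A=1,C=2,G=4,T=8, 0 = non-ACGT seen) and decodes it once through a 16-entry IUPAC
-- table, instead of A's column-wise set building with a sorted-tuple dict lookup
-- (objective: alternative traversal, same return value).

-- ===== PORT A =====
-- the literal dict of degenerate_code, keys = sorted tuples of bases
def pvDegMap : PySem.Dict (List Char) Char :=
  PySem.Dict.ofList [(['A'],'A'),(['C'],'C'),(['G'],'G'),(['T'],'T'),
   (['A','C'],'M'),(['A','G'],'R'),(['A','T'],'W'),(['C','G'],'S'),(['C','T'],'Y'),(['G','T'],'K'),
   (['A','C','G'],'V'),(['A','C','T'],'H'),(['A','G','T'],'D'),(['C','G','T'],'B'),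
   (['A','C','G','T'],'N')]

-- mapping.get(tuple(sorted(bases)), 'N'); identity sort key (injective, so exact on the set)
def degenerate_code (bases : PySem.Set Char) : Char :=
  PySem.Dict.getD pvDegMap (PySem.List.sorted bases (fun x => x) false) 'N'

-- pyGet? motif i is some char for every i in range under Pre_; .getD ' ' is the total form
def consensus_from_cluster (cluster : List String) : String :=
  match cluster with
  | [] => ""
  | c :: _ =>
    let consensus : List Char :=
      (PySem.List.pyRange 0 (c.toList.length : Int) 1).foldl
        (fun acc i =>
          let letters : PySem.Set Char :=
            PySem.Set.ofList (cluster.map (fun motif => (PySem.Str.pyGet? motif i).getD ' '))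
          acc ++ [degenerate_code letters]) []
    String.ofList consensus  -- ''.join of single-char strings

-- ===== PORT B =====
-- B2M = {'A': 1, 'C': 2, 'G': 4, 'T': 8}
def pvB2M : PySem.Dict Char Nat := PySem.Dict.ofList [('A',1),('C',2),('G',4),('T',8)]
-- B2M.get(ch, 0)
def pvGetBit (ch : Char) : Nat := PySem.Dict.getD pvB2M ch 0
-- the comprehension body: m | B2M.get(ch, 0) if m and B2M.get(ch, 0) else 0
def pvStep (m : Nat) (ch : Char) : Nat := if m ≠ 0 ∧ pvGetBit ch ≠ 0 then m ||| pvGetBit ch else 0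
-- M2C = '?ACMGRSVTWYHKDBN'
def pvM2C : List Char := ['?','A','C','M','G','R','S','V','T','W','Y','H','K','D','B','N']

def consensus_from_cluster_alt (cluster : List String) : String :=
  match cluster with
  | [] => ""
  | c :: rest =>
    -- masks = [B2M.get(ch, 0) for ch in cluster[0]]; then fold the remaining motifs in
    let masks : List Nat :=
      rest.foldl (fun ms motif => List.zipWith pvStep ms motif.toList) (c.toList.map pvGetBit)
    -- ''.join(M2C[m] if m else 'N' for m in masks)
    String.ofList (masks.map (fun m =>
      if m ≠ 0 then (PySem.List.pyGet? pvM2C ((m : Nat) : Int)).getD ' ' else 'N'))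

-- ===== PRECONDITION & SPEC =====
-- Pre_ excludes exactly the ragged clusters on which Python A raises IndexError
-- (a motif shorter than the first one); A returns on everything else.
def Pre_consensus_from_cluster (cluster : List String) : Prop :=
  ∀ m ∈ cluster, (cluster.headD "").toList.length ≤ m.toList.length
instance (cluster : List String) : Decidable (Pre_consensus_from_cluster cluster) := by
  unfold Pre_consensus_from_cluster; infer_instance
def pvWitness_consensus_from_cluster : List String := ["ACG", "ATGA"]

def Spec_consensus_from_cluster (cluster : List String) (out : String) : Prop := out = consensus_from_cluster_alt cluster
instance (cluster : List String) (out : String) : Decidable (Spec_consensus_from_cluster cluster out) := by unfold Spec_consensus_from_cluster; infer_instance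

-- ===== CLAIM (what is proved, stated in full; the proofs are below) =====
def Claim_equal_consensus_from_cluster : Prop := ∀ (cluster : List String), Dom_consensus_from_cluster cluster → Pre_consensus_from_cluster cluster → Spec_consensus_from_cluster cluster (consensus_from_cluster cluster)

-- ===== LEMMAS AND PROOFS =====

-- the 4-bit membership mask of a column, B's invariant value at a valid position
def maskOf (col : List Char) : Nat :=
  (if 'A' ∈ col then 1 else 0) + 2 * (if 'C' ∈ col then 1 else 0)
  + 4 * (if 'G' ∈ col then 1 else 0) + 8 * (if 'T' ∈ col then 1 else 0)

lemma pvGetBit_eq (ch : Char) :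
    pvGetBit ch = if ch = 'A' then 1 else if ch = 'C' then 2 else if ch = 'G' then 4
      else if ch = 'T' then 8 else 0 := by
  have hmk : pvB2M = PySem.Dict.mk [('A',1),('C',2),('G',4),('T',8)] := rfl
  unfold pvGetBit
  rw [hmk]
  split_ifs with h1 h2 h3 h4 <;>
  · first
    | (subst_vars; rfl)
    | (simp [PySem.Dict.getD, PySem.Dict.get?, List.find?,
        beq_eq_false_iff_ne.mpr (Ne.symm h1), beq_eq_false_iff_ne.mpr (Ne.symm h2),
        beq_eq_false_iff_ne.mpr (Ne.symm h3), beq_eq_false_iff_ne.mpr (Ne.symm h4)])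

lemma pvGetBit_ne_zero_iff (ch : Char) :
    pvGetBit ch ≠ 0 ↔ ch ∈ (['A','C','G','T'] : List Char) := by
  rw [pvGetBit_eq]
  split_ifs with h1 h2 h3 h4 <;> simp [*]

lemma pvGetBit_lt (ch : Char) : pvGetBit ch < 16 := by
  rw [pvGetBit_eq]; split_ifs <;> norm_num

lemma lorBit (v : Nat) (hv : v = 1 ∨ v = 2 ∨ v = 4 ∨ v = 8) : ∀ (a b g t : Bool),
    v ||| ((cond a 1 0) + 2 * cond b 1 0 + 4 * cond g 1 0 + 8 * cond t 1 0)
    = (cond (a || decide (v = 1)) 1 0) + 2 * cond (b || decide (v = 2)) 1 0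
      + 4 * cond (g || decide (v = 4)) 1 0 + 8 * cond (t || decide (v = 8)) 1 0 := by
  rcases hv with rfl | rfl | rfl | rfl <;> decide

lemma maskOf_eq (col : List Char) :
    maskOf col = (cond (decide ('A' ∈ col)) 1 0) + 2 * cond (decide ('C' ∈ col)) 1 0
      + 4 * cond (decide ('G' ∈ col)) 1 0 + 8 * cond (decide ('T' ∈ col)) 1 0 := by
  simp [maskOf, Bool.cond_decide]

lemma bitMerge (c : Char) (cs : List Char) (hc : pvGetBit c ≠ 0) :
    pvGetBit c ||| maskOf cs = maskOf (c :: cs) := by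
  rw [maskOf_eq, maskOf_eq]
  rw [pvGetBit_eq] at hc ⊢
  split_ifs at hc ⊢ with h1 h2 h3 h4 <;> try subst_vars
  · rw [lorBit 1 (by norm_num)]; simp [List.mem_cons]
  · rw [lorBit 2 (by norm_num)]; simp [List.mem_cons]
  · rw [lorBit 4 (by norm_num)]; simp [List.mem_cons]
  · rw [lorBit 8 (by norm_num)]; simp [List.mem_cons]
  · exact absurd rfl hc

lemma fold_step_zero (cs : List Char) : cs.foldl pvStep 0 = 0 := by
  induction cs with
  | nil => rfl
  | cons c cs ih => simpa [pvStep] using ih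

lemma fold_step_invalid (cs : List Char) (acc : Nat) (h : ∃ ch ∈ cs, pvGetBit ch = 0) :
    cs.foldl pvStep acc = 0 := by
  induction cs generalizing acc with
  | nil => simp at h
  | cons c cs ih =>
    by_cases hc : pvGetBit c = 0
    · simp only [List.foldl_cons]
      have : pvStep acc c = 0 := by simp [pvStep, hc]
      rw [this, fold_step_zero]
    · rcases h with ⟨ch, hch, h0⟩
      rcases List.mem_cons.mp hch with rfl | hm
      · exact absurd h0 hc
      · exact ih _ ⟨ch, hm, h0⟩

lemma fold_step_valid (cs : List Char) (hv : ∀ ch ∈ cs, pvGetBit ch ≠ 0) :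
    ∀ (acc : Nat), acc ≠ 0 → acc < 16 → cs.foldl pvStep acc = acc ||| maskOf cs := by
  induction cs with
  | nil => intro acc h0 h16; simp [maskOf]
  | cons c cs ih =>
    intro acc h0 h16
    have hc : pvGetBit c ≠ 0 := hv c (List.mem_cons_self ..)
    have hstep : pvStep acc c = acc ||| pvGetBit c := by simp [pvStep, h0, hc]
    have hne : acc ||| pvGetBit c ≠ 0 := by
      intro h
      exact h0 (Nat.le_antisymm (h ▸ Nat.left_le_or) (Nat.zero_le _))
    have hlt : acc ||| pvGetBit c < 16 := by
      have := Nat.or_lt_two_pow (n := 4) (by simpa using h16) (by simpa using pvGetBit_lt c)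
      simpa using this
    rw [List.foldl_cons, hstep, ih (fun ch h => hv ch (List.mem_cons_of_mem _ h)) _ hne hlt,
      Nat.or_assoc, bitMerge c cs hc]

-- lookup with a non-ACGT member in the key misses every entry of pvDegMap
lemma bad_lookup (l : List Char) (x : Char) (hx : x ∈ l)
    (hbad : x ∉ (['A','C','G','T'] : List Char)) :
    PySem.Dict.getD pvDegMap l 'N' = 'N' := by
  have hne : ∀ ks : List Char, (∀ y ∈ ks, y ∈ (['A','C','G','T'] : List Char)) → (ks == l) = false := by
    intro ks hk
    simp only [beq_eq_false_iff_ne, ne_eq]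
    rintro rfl
    exact hbad (hk x hx)
  have hmk : pvDegMap = PySem.Dict.mk
      [(['A'],'A'),(['C'],'C'),(['G'],'G'),(['T'],'T'),
       (['A','C'],'M'),(['A','G'],'R'),(['A','T'],'W'),(['C','G'],'S'),(['C','T'],'Y'),(['G','T'],'K'),
       (['A','C','G'],'V'),(['A','C','T'],'H'),(['A','G','T'],'D'),(['C','G','T'],'B'),
       (['A','C','G','T'],'N')] := by rfl
  simp [PySem.Dict.getD, hmk, PySem.Dict.get?,
    hne ['A'] (by simp), hne ['C'] (by simp), hne ['G'] (by simp), hne ['T'] (by simp),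
    hne ['A','C'] (by simp), hne ['A','G'] (by simp), hne ['A','T'] (by simp),
    hne ['C','G'] (by simp), hne ['C','T'] (by simp), hne ['G','T'] (by simp),
    hne ['A','C','G'] (by simp), hne ['A','C','T'] (by simp), hne ['A','G','T'] (by simp),
    hne ['C','G','T'] (by simp), hne ['A','C','G','T'] (by simp)]

-- sorted(set(col)) for an all-ACGT column is the membership filter of "ACGT"
lemma sorted_set_eq_filter (col : List Char)
    (hall : ∀ c ∈ col, c ∈ (['A','C','G','T'] : List Char)) :
    PySem.List.sorted (PySem.Set.ofList col) (fun x => x) false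
      = (['A','C','G','T'] : List Char).filter (fun c => decide (c ∈ col)) := by
  apply PySem.List.sorted_eq_of_perm_of_pairwise_lt
  · rw [List.perm_ext_iff_of_nodup ((by decide : (['A','C','G','T'] : List Char).Nodup).filter _)
      (PySem.Set.nodup_ofList col)]
    intro a
    simp only [List.mem_filter, PySem.Set.mem_ofList, decide_eq_true_eq]
    exact ⟨fun h => h.2, fun h => ⟨hall a h, h⟩⟩
  · exact List.Pairwise.filter _ (by decide)

-- decoding any membership mask through the table is the dict lookup of the filtered key
lemma maskChar (col : List Char) :
    (if maskOf col ≠ 0 then (PySem.List.pyGet? pvM2C ((maskOf col : Nat) : Int)).getD ' ' else 'N')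
      = PySem.Dict.getD pvDegMap ((['A','C','G','T'] : List Char).filter (fun c => decide (c ∈ col))) 'N' := by
  by_cases hA : 'A' ∈ col <;> by_cases hC : 'C' ∈ col <;>
    by_cases hG : 'G' ∈ col <;> by_cases hT : 'T' ∈ col <;>
    simp [maskOf, hA, hC, hG, hT] <;> decide

-- per-column agreement: B's decoded column fold is A's degenerate code of the column's set
lemma charEq (c0 : Char) (cs : List Char) :
    (if cs.foldl pvStep (pvGetBit c0) ≠ 0 then
       (PySem.List.pyGet? pvM2C ((cs.foldl pvStep (pvGetBit c0) : Nat) : Int)).getD ' '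
     else 'N')
    = degenerate_code (PySem.Set.ofList (c0 :: cs)) := by
  by_cases hall : ∀ c ∈ (c0 :: cs), pvGetBit c ≠ 0
  · have hc0 : pvGetBit c0 ≠ 0 := hall c0 (List.mem_cons_self ..)
    have hfold : cs.foldl pvStep (pvGetBit c0) = maskOf (c0 :: cs) := by
      rw [fold_step_valid cs (fun ch h => hall ch (List.mem_cons_of_mem _ h)) _ hc0 (pvGetBit_lt c0),
        bitMerge c0 cs hc0]
    have hmem : ∀ c ∈ (c0 :: cs), c ∈ (['A','C','G','T'] : List Char) := by
      intro c hc
      exact (pvGetBit_ne_zero_iff c).mp (hall c hc)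
    unfold degenerate_code
    rw [hfold, sorted_set_eq_filter _ hmem]
    exact maskChar _
  · push Not at hall
    obtain ⟨x, hx, hbad⟩ := hall
    have h0 : cs.foldl pvStep (pvGetBit c0) = 0 := by
      rcases List.mem_cons.mp hx with rfl | hm
      · rw [hbad, fold_step_zero]
      · exact fold_step_invalid cs _ ⟨x, hm, hbad⟩
    rw [h0, if_neg (by simp)]
    exact (bad_lookup _ x (by simpa [PySem.Set.mem_ofList] using hx)
      (by intro h; exact absurd ((pvGetBit_ne_zero_iff x).mpr h) (by simp [hbad]))).symm

lemma map_range_getD (ms : List Nat) :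
    (List.range ms.length).map (fun k => ms.getD k 0) = ms := by
  apply List.ext_getElem
  · simp
  · intro k h1 h2
    simp [List.getD_eq_getElem?_getD, List.getElem?_eq_getElem h2]

-- B's row-fold of zipWith, computed pointwise per column
lemma foldZip (rows : List String) (ms : List Nat)
    (h : ∀ r ∈ rows, ms.length ≤ r.toList.length) :
    rows.foldl (fun a motif => List.zipWith pvStep a motif.toList) ms
      = (List.range ms.length).map
          (fun k => rows.foldl (fun m motif => pvStep m (motif.toList.getD k ' ')) (ms.getD k 0)) := by
  induction rows generalizing ms with
  | nil => simp only [List.foldl_nil]; exact (map_range_getD ms).symm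
  | cons motif rows ih =>
    have hm : ms.length ≤ motif.toList.length := h motif (List.mem_cons_self ..)
    have hlen : (List.zipWith pvStep ms motif.toList).length = ms.length := by
      rw [List.length_zipWith]; exact Nat.min_eq_left hm
    rw [List.foldl_cons, ih _ (by intro r hr; rw [hlen]; exact h r (List.mem_cons_of_mem _ hr)), hlen]
    apply List.map_congr_left
    intro k hk
    have hk' : k < ms.length := List.mem_range.mp hk
    have hk2 : k < motif.toList.length := lt_of_lt_of_le hk' hm
    rw [List.foldl_cons]
    congr 1
    rw [List.getD_eq_getElem _ _ (hlen ▸ hk'), List.getElem_zipWith,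
      List.getD_eq_getElem _ _ hk', List.getD_eq_getElem _ _ hk2]

-- ===== VERDICT (by name: the statement is the Claim_ definition above) =====
theorem consensus_from_cluster_spec : Claim_equal_consensus_from_cluster := by
  intro cluster _ hpre
  unfold Spec_consensus_from_cluster
  match cluster with
  | [] => rfl
  | c :: rest =>
    have hpre' : ∀ r ∈ rest, c.toList.length ≤ r.toList.length := by
      intro r hr
      simpa using hpre r (List.mem_cons_of_mem _ hr)
    unfold consensus_from_cluster consensus_from_cluster_alt
    simp only
    congr 1
    rw [PySem.List.foldl_append_singleton_eq_map, List.nil_append,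
      PySem.List.pyRange_one, List.map_map]
    rw [foldZip rest _ (by intro r hr; simpa using hpre' r hr), List.map_map, List.length_map]
    have hL : (((c.toList.length : Int)) - 0).toNat = c.toList.length := by simp
    rw [hL]
    apply List.map_congr_left
    intro k hk
    have hk' : k < c.toList.length := List.mem_range.mp hk
    simp only [Function.comp]
    have hcol : ∀ m : String, k < m.toList.length →
        (PySem.Str.pyGet? m ((0 : Int) + (k : Nat))).getD ' ' = m.toList.getD k ' ' := by
      intro m hm
      rw [zero_add]
      simp [List.getD_eq_getElem?_getD]
    rw [List.map_cons]
    rw [hcol c hk']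
    rw [List.map_congr_left (fun r hr => hcol r (lt_of_lt_of_le hk' (hpre' r hr)))]
    rw [← List.foldl_map (f := fun motif : String => motif.toList.getD k ' ') (g := pvStep)]
    have hacc : (c.toList.map pvGetBit).getD k 0 = pvGetBit (c.toList.getD k ' ') := by
      rw [List.getD_eq_getElem _ _ (by simpa using hk'), List.getElem_map,
        List.getD_eq_getElem _ _ hk']
    rw [hacc]
    exact (charEq _ _).symm
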